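-- pv_equiv track=rewrite | github.com/mbhai002/projet-avril25_cde_airlines | web/dash/pages/meteo.py | decode_wx_string
-- ===== SOURCE A (Python) =====
-- WX_ABBREVIATIONS = {
--     # Descripteurs
--     'MI': 'Mince (shallow)',
--     'BC': 'Bancs (patches)',
--     'PR': 'Partiel (partial)',
--     'DR': 'Chasse basse (low drifting)',
--     'BL': 'Chasse elevee (blowing)',
--     'SH': 'Averses (showers)',
--     'TS': 'Orage (thunderstorm)',
--     'FZ': 'Givrant (freezing)',
--     'RE': 'Recent',
--     'VC': 'Au voisinage (vicinity)',
--     # Precipitations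
--     'RA': 'Pluie (rain)',
--     'DZ': 'Bruine (drizzle)',
--     'SN': 'Neige (snow)',
--     'SG': 'Neige en grains (snow grains)',
--     'IC': 'Cristaux de glace (ice crystals)',
--     'PL': 'Granules de glace (ice pellets)',
--     'GR': 'Grele (hail >= 5mm)',
--     'GS': 'Gresil (small hail < 5mm)',
--     'UP': 'Precipitation inconnue (unknown)',
--     # Obscurcissements
--     'FG': 'Brouillard (fog, vis < 1 km)',
--     'BR': 'Brume (mist, 1-5 km vis)',
--     'HZ': 'Brume seche (haze)',
--     'FU': 'Fumee (smoke)',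
--     'VA': 'Cendres volcaniques (volcanic ash)',
--     'DU': 'Poussiere etendue (dust)',
--     'SA': 'Sable (sand)',
--     'PY': 'Embruns (spray)',
--     # Autres
--     'SQ': 'Grain (squall)',
--     'PO': 'Tourbillons de sable/poussiere',
--     'DS': 'Tempete de sable (dust storm)',
--     'SS': 'Tempete de sable (sandstorm)',
--     'FC': 'Trombe/tornade (funnel cloud)',
--     # Intensite
--     '+': 'Fort (heavy)',
--     '-': 'Faible (light)',
-- }
--
-- def decode_wx_string(wx):
--     """Decode une chaine wx_string METAR en description lisible."""
--     if not wx or wx == 'CLEAR':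
--         return 'Ciel degage / Pas de phenomene'
--
--     parts = []
--     intensity = ''
--
--     # Gerer l'intensite
--     clean_wx = wx.strip()
--     if clean_wx.startswith('+'):
--         intensity = 'Fort '
--         clean_wx = clean_wx[1:]
--     elif clean_wx.startswith('-'):
--         intensity = 'Faible '
--         clean_wx = clean_wx[1:]
--
--     # Decouper en codes de 2 caracteres
--     remaining = clean_wx
--     while remaining:
--         found = False
--         for length in [2]:
--             code = remaining[:length]
--             if code in WX_ABBREVIATIONS:
--                 parts.append(WX_ABBREVIATIONS[code])
--                 remaining = remaining[length:]
--                 found = True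
--                 break
--         if not found:
--             remaining = remaining[1:]
--
--     if parts:
--         return f"{intensity}{' + '.join(parts)}"
--     return wx
-- ===== SOURCE B (Python) =====
-- WX_ABBREVIATIONS = {
--     'MI': 'Mince (shallow)', 'BC': 'Bancs (patches)', 'PR': 'Partiel (partial)',
--     'DR': 'Chasse basse (low drifting)', 'BL': 'Chasse elevee (blowing)',
--     'SH': 'Averses (showers)', 'TS': 'Orage (thunderstorm)', 'FZ': 'Givrant (freezing)',
--     'RE': 'Recent', 'VC': 'Au voisinage (vicinity)',
--     'RA': 'Pluie (rain)', 'DZ': 'Bruine (drizzle)', 'SN': 'Neige (snow)',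
--     'SG': 'Neige en grains (snow grains)', 'IC': 'Cristaux de glace (ice crystals)',
--     'PL': 'Granules de glace (ice pellets)', 'GR': 'Grele (hail >= 5mm)',
--     'GS': 'Gresil (small hail < 5mm)', 'UP': 'Precipitation inconnue (unknown)',
--     'FG': 'Brouillard (fog, vis < 1 km)', 'BR': 'Brume (mist, 1-5 km vis)',
--     'HZ': 'Brume seche (haze)', 'FU': 'Fumee (smoke)',
--     'VA': 'Cendres volcaniques (volcanic ash)', 'DU': 'Poussiere etendue (dust)',
--     'SA': 'Sable (sand)', 'PY': 'Embruns (spray)',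
--     'SQ': 'Grain (squall)', 'PO': 'Tourbillons de sable/poussiere',
--     'DS': 'Tempete de sable (dust storm)', 'SS': 'Tempete de sable (sandstorm)',
--     'FC': 'Trombe/tornade (funnel cloud)',
--     '+': 'Fort (heavy)', '-': 'Faible (light)',
-- }
--
-- _INTENSITY = {'+': 'Fort ', '-': 'Faible '}
--
--
-- def _codes(s):
--     """Tokenize with an index pointer: a recognised 2-char (or trailing 1-char) code, else slide one char."""
--     out = []
--     i = 0
--     n = len(s)
--     while i < n:
--         head = s[i:i + 2]
--         if head in WX_ABBREVIATIONS:
--             out.append(head)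
--             i += 2
--         else:
--             i += 1
--     return out
--
--
-- def decode_wx_string(wx):
--     """Decode une chaine wx_string METAR en description lisible."""
--     if not wx or wx == 'CLEAR':
--         return 'Ciel degage / Pas de phenomene'
--     clean = wx.strip()
--     head = clean[:1]
--     if head in _INTENSITY:
--         intensity = _INTENSITY[head]
--         clean = clean[1:]
--     else:
--         intensity = ''
--     descs = [WX_ABBREVIATIONS[c] for c in _codes(clean)]
--     if descs:
--         return intensity + ' + '.join(descs)
--     return wx
-- ===== Notes on version B (the rewrite author's own statement) =====
-- stated objective: faster
-- what changed: Replaced A's while loop that re-slices and reassigns the remaining string and accumulates descriptions under a found-flag with an index-pointer tokenizer that collects the matched codes in one scan and then maps them through the abbreviation table; the intensity if/elif chain becomes a dict lookup on the first character.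
import Mathlib
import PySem

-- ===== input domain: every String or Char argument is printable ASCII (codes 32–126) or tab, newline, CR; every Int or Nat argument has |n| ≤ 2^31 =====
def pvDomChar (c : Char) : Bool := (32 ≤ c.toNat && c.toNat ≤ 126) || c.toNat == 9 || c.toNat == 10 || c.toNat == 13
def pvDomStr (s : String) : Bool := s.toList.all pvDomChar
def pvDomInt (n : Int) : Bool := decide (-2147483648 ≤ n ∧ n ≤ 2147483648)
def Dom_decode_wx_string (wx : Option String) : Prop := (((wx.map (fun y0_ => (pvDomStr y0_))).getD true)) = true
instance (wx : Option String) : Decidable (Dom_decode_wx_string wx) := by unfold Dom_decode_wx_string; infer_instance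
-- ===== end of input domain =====

-- B replaces A's string-reslicing while loop with an index-pointer tokenizer that collects the matched
-- codes in one scan and then maps them to descriptions; the intensity if/elif chain becomes a dict
-- lookup on the first character (objective: faster — avoids re-slicing the remaining string each step).

-- ===== PORT A =====
def wxAbbreviations : PySem.Dict String String := PySem.Dict.mk [
  ("MI", "Mince (shallow)"), ("BC", "Bancs (patches)"), ("PR", "Partiel (partial)"),
  ("DR", "Chasse basse (low drifting)"), ("BL", "Chasse elevee (blowing)"),
  ("SH", "Averses (showers)"), ("TS", "Orage (thunderstorm)"), ("FZ", "Givrant (freezing)"),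
  ("RE", "Recent"), ("VC", "Au voisinage (vicinity)"),
  ("RA", "Pluie (rain)"), ("DZ", "Bruine (drizzle)"), ("SN", "Neige (snow)"),
  ("SG", "Neige en grains (snow grains)"), ("IC", "Cristaux de glace (ice crystals)"),
  ("PL", "Granules de glace (ice pellets)"), ("GR", "Grele (hail >= 5mm)"),
  ("GS", "Gresil (small hail < 5mm)"), ("UP", "Precipitation inconnue (unknown)"),
  ("FG", "Brouillard (fog, vis < 1 km)"), ("BR", "Brume (mist, 1-5 km vis)"),
  ("HZ", "Brume seche (haze)"), ("FU", "Fumee (smoke)"),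
  ("VA", "Cendres volcaniques (volcanic ash)"), ("DU", "Poussiere etendue (dust)"),
  ("SA", "Sable (sand)"), ("PY", "Embruns (spray)"),
  ("SQ", "Grain (squall)"), ("PO", "Tourbillons de sable/poussiere"),
  ("DS", "Tempete de sable (dust storm)"), ("SS", "Tempete de sable (sandstorm)"),
  ("FC", "Trombe/tornade (funnel cloud)"),
  ("+", "Fort (heavy)"), ("-", "Faible (light)")]

-- A's while loop: consume 2 chars on a dict hit (appending the description), slide 1 otherwise.
def pvLoopA : List Char → List String → List String
  | [], parts => parts
  | c :: rest, parts =>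
      let remaining := c :: rest
      let code := PySem.List.slice remaining none (some 2)      -- remaining[:2]
      match wxAbbreviations.get? (String.ofList code) with
      | some v => pvLoopA (PySem.List.slice remaining (some 2) none) (parts ++ [v])   -- remaining[2:]
      | none => pvLoopA (PySem.List.slice remaining (some 1) none) parts              -- remaining[1:]
termination_by cs _ => cs.length
decreasing_by
  · rw [PySem.List.slice_from _ (show (0:Int) ≤ 2 by omega)]; simp
  · rw [PySem.List.slice_from _ (show (0:Int) ≤ 1 by omega)]; simp

def decode_wx_string (wx : Option String) : String :=
  match wx with
  | none => "Ciel degage / Pas de phenomene"                    -- 'not wx': None or ""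
  | some s =>
    if s = "" ∨ s = "CLEAR" then "Ciel degage / Pas de phenomene"
    else
      let cleanWx := PySem.Chars.strip s.toList
      let p :=
        if PySem.Chars.startswith cleanWx "+".toList then
          (("Fort " : String), PySem.List.slice cleanWx (some 1) none)    -- clean_wx[1:]
        else if PySem.Chars.startswith cleanWx "-".toList then
          (("Faible " : String), PySem.List.slice cleanWx (some 1) none)
        else (("" : String), cleanWx)
      let parts := pvLoopA p.2 []
      if parts ≠ [] then
        String.ofList (p.1.toList ++ PySem.Chars.join " + ".toList (parts.map String.toList))
      else s

-- ===== PORT B =====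
def pvIntensityDict : PySem.Dict String String :=
  PySem.Dict.mk [("+", "Fort "), ("-", "Faible ")]

-- B's index-pointer tokenizer: the list of recognised codes, in order.
def pvCodesB (s : List Char) (i : Nat) (out : List String) : List String :=
  if h : i < s.length then
    let head := String.ofList (PySem.List.slice s (some (i : Int)) (some ((i + 2 : Nat) : Int)))  -- s[i:i+2]
    if wxAbbreviations.contains head then
      pvCodesB s (i + 2) (out ++ [head])
    else
      pvCodesB s (i + 1) out
  else out
termination_by s.length - i
decreasing_by
  · omega
  · omega

def decode_wx_string_alt (wx : Option String) : String :=
  match wx with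
  | none => "Ciel degage / Pas de phenomene"
  | some s =>
    if s = "" ∨ s = "CLEAR" then "Ciel degage / Pas de phenomene"
    else
      let clean := PySem.Chars.strip s.toList
      let head := String.ofList (PySem.List.slice clean none (some 1))    -- clean[:1]
      let p :=
        if pvIntensityDict.contains head then
          (pvIntensityDict.getD head "", PySem.List.slice clean (some 1) none)
        else (("" : String), clean)
      -- WX_ABBREVIATIONS[c]: every code pvCodesB returns is a key, so the getD default is unreachable
      let descs := (pvCodesB p.2 0 []).map (fun c => wxAbbreviations.getD c "")
      if descs ≠ [] then
        String.ofList (p.1.toList ++ PySem.Chars.join " + ".toList (descs.map String.toList))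
      else s

-- ===== PRECONDITION & SPEC =====
def Spec_decode_wx_string (wx : Option String) (out : String) : Prop := out = decode_wx_string_alt wx
instance (wx : Option String) (out : String) : Decidable (Spec_decode_wx_string wx out) := by unfold Spec_decode_wx_string; infer_instance

-- ===== CLAIM (what is proved, stated in full; the proofs are below) =====
def Claim_equal_decode_wx_string : Prop := ∀ (wx : Option String), Dom_decode_wx_string wx → Spec_decode_wx_string wx (decode_wx_string wx)

-- ===== LEMMAS AND PROOFS =====

-- The accumulator of pvCodesB factors out.
theorem pvCodesB_acc : ∀ (fuel : Nat) (s : List Char) (i : Nat) (out : List String),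
    s.length - i ≤ fuel → pvCodesB s i out = out ++ pvCodesB s i [] := by
  intro fuel
  induction fuel with
  | zero =>
    intro s i out h
    have hn : ¬ i < s.length := by omega
    conv_lhs => rw [pvCodesB]
    conv_rhs => rw [pvCodesB]
    simp [hn]
  | succ n ih =>
    intro s i out h
    conv_lhs => rw [pvCodesB]
    conv_rhs => rw [pvCodesB]
    by_cases h1 : i < s.length
    · simp only [h1, dif_pos]
      by_cases h2 : wxAbbreviations.contains
          (String.ofList (PySem.List.slice s (some (i : Int)) (some ((i + 2 : Nat) : Int)))) = true
      · simp only [h2, if_pos]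
        conv_lhs => rw [ih s (i + 2) _ (by omega)]
        conv_rhs => rw [ih s (i + 2) _ (by omega)]
        simp [List.append_assoc]
      · simp only [eq_false_of_ne_true h2, Bool.false_eq_true, if_neg, not_false_iff]
        exact ih s (i + 1) out (by omega)
    · simp [h1]

-- A's sliding-slice loop over the suffix from i equals parts ++ the descriptions of B's tokens from i.
theorem pvLoopA_eq_codesB : ∀ (fuel : Nat) (s : List Char) (i : Nat) (parts : List String),
    s.length - i ≤ fuel →
    pvLoopA (s.drop i) parts = parts ++ (pvCodesB s i []).map (fun c => wxAbbreviations.getD c "") := by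
  intro fuel
  induction fuel with
  | zero =>
    intro s i parts h
    have hn : ¬ i < s.length := by omega
    have hd : s.drop i = [] := List.drop_eq_nil_of_le (by omega)
    rw [hd, pvLoopA, pvCodesB]
    simp [hn]
  | succ n ih =>
    intro s i parts h
    by_cases h1 : i < s.length
    · have hd : s.drop i = s[i] :: s.drop (i + 1) := List.drop_eq_getElem_cons h1
      have htake : PySem.List.slice (s[i] :: s.drop (i + 1)) none (some 2)
          = (s.drop i).take 2 := by
        rw [PySem.List.slice_to _ (show (0:Int) ≤ 2 by omega), ← hd]; rfl
      have ehead : PySem.List.slice s (some (i : Int)) (some ((i + 2 : Nat) : Int))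
          = (s.drop i).take 2 := by
        rw [PySem.List.slice_natCast]
        congr 1
        omega
      rw [hd, pvLoopA, pvCodesB]
      simp only [htake, ehead, h1, dif_pos]
      cases hg : wxAbbreviations.get? (String.ofList ((s.drop i).take 2)) with
      | some v =>
        have hc : wxAbbreviations.contains (String.ofList ((s.drop i).take 2)) = true := by
          rw [PySem.Dict.contains_eq_isSome_get?, hg]; rfl
        simp only [hc, if_pos]
        have hdrop2 : PySem.List.slice (s[i] :: s.drop (i + 1)) (some 2) none = s.drop (i + 2) := by
          rw [PySem.List.slice_from _ (show (0:Int) ≤ 2 by omega), ← hd]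
          rw [show ((2:Int).toNat) = 2 from rfl, List.drop_drop]
        rw [hdrop2, ih s (i + 2) (parts ++ [v]) (by omega)]
        conv_rhs => rw [pvCodesB_acc (s.length - (i + 2)) s (i + 2) _ le_rfl]
        simp [List.append_assoc, PySem.Dict.getD_eq_get?_getD, hg]
      | none =>
        have hc : wxAbbreviations.contains (String.ofList ((s.drop i).take 2)) = false := by
          rw [PySem.Dict.contains_eq_isSome_get?, hg]; rfl
        simp only [hc, Bool.false_eq_true, if_neg, not_false_iff]
        have hdrop1 : PySem.List.slice (s[i] :: s.drop (i + 1)) (some 1) none = s.drop (i + 1) := by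
          rw [PySem.List.slice_from _ (show (0:Int) ≤ 1 by omega), ← hd]
          rw [show ((1:Int).toNat) = 1 from rfl, List.drop_drop]
        rw [hdrop1]
        exact ih s (i + 1) parts (by omega)
    · have hn : s.drop i = [] := List.drop_eq_nil_of_le (by omega)
      rw [hn, pvLoopA, pvCodesB]
      simp [h1]

-- The two function bodies agree for an arbitrary stripped character list cs (s is the fallback value).
theorem pvBody_eq (s : String) (cs : List Char) :
    (let p :=
        if PySem.Chars.startswith cs "+".toList then
          (("Fort " : String), PySem.List.slice cs (some 1) none)
        else if PySem.Chars.startswith cs "-".toList then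
          (("Faible " : String), PySem.List.slice cs (some 1) none)
        else (("" : String), cs)
     let parts := pvLoopA p.2 []
     if parts ≠ [] then
       String.ofList (p.1.toList ++ PySem.Chars.join " + ".toList (parts.map String.toList))
     else s)
    =
    (let head := String.ofList (PySem.List.slice cs none (some 1))
     let p :=
        if pvIntensityDict.contains head then
          (pvIntensityDict.getD head "", PySem.List.slice cs (some 1) none)
        else (("" : String), cs)
     let descs := (pvCodesB p.2 0 []).map (fun c => wxAbbreviations.getD c "")
     if descs ≠ [] then
       String.ofList (p.1.toList ++ PySem.Chars.join " + ".toList (descs.map String.toList))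
     else s) := by
  have hloop : ∀ ds : List Char, pvLoopA ds [] = (pvCodesB ds 0 []).map (fun c => wxAbbreviations.getD c "") := by
    intro ds
    simpa using pvLoopA_eq_codesB ds.length ds 0 [] (by omega)
  match cs with
  | [] =>
    have h1 : PySem.Chars.startswith [] "+".toList = false := by
      rw [Bool.eq_false_iff]; intro hc; rw [PySem.Chars.startswith_iff] at hc; simp at hc
    have h2 : PySem.Chars.startswith [] "-".toList = false := by
      rw [Bool.eq_false_iff]; intro hc; rw [PySem.Chars.startswith_iff] at hc; simp at hc
    have h3 : PySem.List.slice ([] : List Char) none (some 1) = [] := by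
      rw [PySem.List.slice_to _ (show (0:Int) ≤ 1 by omega)]; rfl
    have h4 : pvIntensityDict.contains (String.ofList []) = false := by decide
    simp only [h1, h2, h3, h4, Bool.false_eq_true, if_neg, not_false_iff, hloop]
  | c :: rest =>
    have hslice1 : PySem.List.slice (c :: rest) none (some 1) = [c] := by
      rw [PySem.List.slice_to _ (show (0:Int) ≤ 1 by omega)]; rfl
    by_cases hp : c = '+'
    · subst hp
      have hsw : PySem.Chars.startswith ('+' :: rest) "+".toList = true := by
        simp [PySem.Chars.startswith_iff, List.cons_prefix_cons]
      have hc : pvIntensityDict.contains (String.ofList ['+']) = true := by decide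
      have hg : pvIntensityDict.getD (String.ofList ['+']) "" = "Fort " := by decide
      simp only [hslice1, hsw, hc, hg, if_pos, hloop]
    · by_cases hm : c = '-'
      · subst hm
        have hsw1 : PySem.Chars.startswith ('-' :: rest) "+".toList = false := by
          rw [Bool.eq_false_iff]; intro hcon
          rw [PySem.Chars.startswith_iff, show ("+".toList) = ['+'] from rfl,
              List.cons_prefix_cons] at hcon
          exact absurd hcon.1.symm (by decide)
        have hsw2 : PySem.Chars.startswith ('-' :: rest) "-".toList = true := by
          simp [PySem.Chars.startswith_iff, List.cons_prefix_cons]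
        have hc : pvIntensityDict.contains (String.ofList ['-']) = true := by decide
        have hg : pvIntensityDict.getD (String.ofList ['-']) "" = "Faible " := by decide
        simp only [hslice1, hsw1, hsw2, hc, hg, Bool.false_eq_true, if_neg, not_false_iff,
                   if_pos, hloop]
      · have hsw1 : PySem.Chars.startswith (c :: rest) "+".toList = false := by
          rw [Bool.eq_false_iff]; intro hcon
          rw [PySem.Chars.startswith_iff, show ("+".toList) = ['+'] from rfl,
              List.cons_prefix_cons] at hcon
          exact hp hcon.1.symm
        have hsw2 : PySem.Chars.startswith (c :: rest) "-".toList = false := by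
          rw [Bool.eq_false_iff]; intro hcon
          rw [PySem.Chars.startswith_iff, show ("-".toList) = ['-'] from rfl,
              List.cons_prefix_cons] at hcon
          exact hm hcon.1.symm
        have hc : pvIntensityDict.contains (String.ofList [c]) = false := by
          simp [pvIntensityDict, PySem.Dict.contains_mk]
          refine ⟨fun hcon => hp ?_, fun hcon => hm ?_⟩
          · have := congrArg String.toList hcon; simpa using this.symm
          · have := congrArg String.toList hcon; simpa using this.symm
        simp only [hslice1, hsw1, hsw2, hc, Bool.false_eq_true, if_neg, not_false_iff, hloop]

-- ===== VERDICT (by name: the statement is the Claim_ definition above) =====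
theorem decode_wx_string_spec : Claim_equal_decode_wx_string := by
  unfold Claim_equal_decode_wx_string Spec_decode_wx_string
  intro wx _
  cases wx with
  | none => rfl
  | some s =>
    rw [decode_wx_string, decode_wx_string_alt]
    by_cases h0 : s = "" ∨ s = "CLEAR"
    · simp only [h0, if_pos]
    · rw [if_neg h0, if_neg h0]
      exact pvBody_eq s (PySem.Chars.strip s.toList)
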